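-- pv_equiv track=rewrite | github.com/ComeBek/my_mini_exs | alpha_mirror/alpha_mirror.py | alpha_mirror
-- ===== SOURCE A (Python) =====
-- def alpha_mirror(string):
--     result = ''
--     for char in string:
--         if char.isalpha():
--             if char.isupper():
--                 result += chr(90 - ord(char) + 65)
--             else:
--                 result += chr(122 - ord(char) + 97)
--         else:
--             result += char
--     return result
-- ===== SOURCE B (Python) =====
-- def alpha_mirror(string):
--     src = ''.join(map(chr, range(97, 123))) + ''.join(map(chr, range(65, 91)))
--     dst = ''.join(map(chr, range(122, 96, -1))) + ''.join(map(chr, range(90, 64, -1)))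
--     return string.translate(str.maketrans(src, dst))
-- ===== Notes on version B (the rewrite author's own statement) =====
-- stated objective: idiomatic
-- what changed: B precomputes a 52-entry translation table once with str.maketrans and applies it in a single str.translate call, eliminating A's per-character isalpha/isupper branching and quadratic-prone string concatenation.
import Mathlib
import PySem

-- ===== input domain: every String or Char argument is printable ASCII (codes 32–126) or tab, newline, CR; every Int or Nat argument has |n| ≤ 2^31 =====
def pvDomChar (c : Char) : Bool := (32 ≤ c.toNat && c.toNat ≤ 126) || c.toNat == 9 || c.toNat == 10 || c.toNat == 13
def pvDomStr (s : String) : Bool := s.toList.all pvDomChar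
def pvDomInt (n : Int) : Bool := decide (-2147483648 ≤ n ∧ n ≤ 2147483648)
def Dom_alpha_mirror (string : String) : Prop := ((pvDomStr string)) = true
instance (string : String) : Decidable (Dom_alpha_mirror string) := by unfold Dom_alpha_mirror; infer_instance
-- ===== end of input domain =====

-- B builds a 52-entry mirror translation table once and maps it over the string (str.maketrans/translate style), replacing A's per-character isalpha/isupper branching; same O(n) cost.


-- ===== PORT A =====
def alpha_mirror (string : String) : String :=
  String.mk (string.toList.foldl (fun result char =>
    if PySem.Chars.isalpha char then
      if PySem.Chars.isupper char then
        result ++ [Char.ofNat (90 - char.toNat + 65)]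
      else
        result ++ [Char.ofNat (122 - char.toNat + 97)]
    else
      result ++ [char]) [])

-- ===== PORT B =====
-- str.maketrans(src, dst): a dict mapping each letter to its mirror
def pvMirrorTable : PySem.Dict Char Char :=
  PySem.Dict.ofList
    (((List.range 26).map (fun i => (Char.ofNat (97 + i), Char.ofNat (122 - i)))) ++
     ((List.range 26).map (fun i => (Char.ofNat (65 + i), Char.ofNat (90 - i)))))

-- string.translate(table): chars absent from the table pass through unchanged
def alpha_mirror_alt (string : String) : String :=
  String.mk (string.toList.map (fun c => pvMirrorTable.getD c c))

-- ===== PRECONDITION & SPEC =====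
def Spec_alpha_mirror (string : String) (out : String) : Prop := out = alpha_mirror_alt string
instance (string : String) (out : String) : Decidable (Spec_alpha_mirror string out) := by unfold Spec_alpha_mirror; infer_instance

-- ===== CLAIM (what is proved, stated in full; the proofs are below) =====
def Claim_equal_alpha_mirror : Prop := ∀ (string : String), Dom_alpha_mirror string → Spec_alpha_mirror string (alpha_mirror string)

-- ===== LEMMAS AND PROOFS =====
def pvMirrorA (char : Char) : Char :=
  if PySem.Chars.isalpha char then
    if PySem.Chars.isupper char then Char.ofNat (90 - char.toNat + 65)
    else Char.ofNat (122 - char.toNat + 97)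
  else char

set_option maxRecDepth 40000 in
theorem pvMirror_agree_dom :
    (((List.range 127).map Char.ofNat).all (fun c => pvMirrorA c == pvMirrorTable.getD c c)) = true := by
  decide

theorem pvMirror_agree (c : Char) (h : pvDomChar c = true) :
    pvMirrorA c = pvMirrorTable.getD c c := by
  have hmem : c ∈ (List.range 127).map Char.ofNat := by
    refine List.mem_map.mpr ⟨c.toNat, List.mem_range.mpr ?_, Char.ofNat_toNat c⟩
    simp [pvDomChar] at h
    omega
  exact eq_of_beq (List.all_eq_true.mp pvMirror_agree_dom c hmem)

set_option maxRecDepth 10000 in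
theorem alpha_mirror_spec : Claim_equal_alpha_mirror := by
  intro s hdom
  unfold Spec_alpha_mirror alpha_mirror alpha_mirror_alt
  have hfun : (fun (result : List Char) char =>
      if PySem.Chars.isalpha char then
        if PySem.Chars.isupper char then result ++ [Char.ofNat (90 - char.toNat + 65)]
        else result ++ [Char.ofNat (122 - char.toNat + 97)]
      else result ++ [char]) = (fun result char => result ++ [pvMirrorA char]) := by
    funext r c
    simp only [pvMirrorA]
    split_ifs <;> rfl
  rw [hfun, PySem.List.foldl_append_singleton_eq_map, List.nil_append]
  congr 1
  apply List.map_congr_left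
  intro c hc
  exact pvMirror_agree c (by
    simp [Dom_alpha_mirror, pvDomStr, List.all_eq_true] at hdom
    exact hdom c hc)
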